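-- pv_equiv track=rewrite | github.com/nebojsa-zakic/mini_framework | mini_http/route/router.py | _compare_routes
-- ===== SOURCE A (Python) =====
-- def _compare_routes(reg_route, recv_route):
--     # this part can be optimized both speed can go to O(n)
--     # memory to O(K)
--     reg_elements = reg_route.split('/')
--     recv_elements = recv_route.split('/')
--
--     if len(reg_elements) != len(recv_elements):
--         return False
--
--     for reg_e, recv_e in zip(reg_elements, recv_elements):
--         if reg_e == '_' or reg_e == recv_e:
--             continue
--         return False
--
--     return True
-- ===== SOURCE B (Python) =====
-- def _compare_routes(reg_route, recv_route):
--     # Single pass via str.partition: compare one segment at a time,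
--     # no intermediate lists and no separate length check.
--     while True:
--         reg_head, reg_sep, reg_rest = reg_route.partition('/')
--         recv_head, recv_sep, recv_rest = recv_route.partition('/')
--         if reg_head != '_' and reg_head != recv_head:
--             return False
--         if reg_sep != recv_sep:
--             return False
--         if not reg_sep:
--             return True
--         reg_route, recv_route = reg_rest, recv_rest
-- ===== Notes on version B (the rewrite author's own statement) =====
-- stated objective: alternative
-- what changed: Replaces split-into-two-lists + length check + zip loop with a single segment-at-a-time pass using str.partition, deciding each segment and the separator structure as it goes, building no lists.
import Mathlib
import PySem

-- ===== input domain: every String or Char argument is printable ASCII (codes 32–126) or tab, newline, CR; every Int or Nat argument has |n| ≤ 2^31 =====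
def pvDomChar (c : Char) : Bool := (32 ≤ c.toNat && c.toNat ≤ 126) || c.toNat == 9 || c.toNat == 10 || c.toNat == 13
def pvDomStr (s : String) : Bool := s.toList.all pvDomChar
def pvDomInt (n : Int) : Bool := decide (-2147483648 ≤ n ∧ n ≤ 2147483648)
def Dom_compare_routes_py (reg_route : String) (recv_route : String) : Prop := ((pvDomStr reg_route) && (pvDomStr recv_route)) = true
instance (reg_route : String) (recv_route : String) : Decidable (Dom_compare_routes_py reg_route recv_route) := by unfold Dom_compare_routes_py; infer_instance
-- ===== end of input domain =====

-- B replaces split-into-lists + length check + zip loop by a single segment-at-a-time pass via str.partition; alternative (same cost), no lists built.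

-- ===== PORT A =====
-- the 'for … return False / return True' loop over zip, as structural recursion
def loopA : List (List Char × List Char) → Bool
  | [] => true
  | (reg_e, recv_e) :: rest =>
      if reg_e = ['_'] ∨ reg_e = recv_e then loopA rest else false

def compare_routes_py (reg_route : String) (recv_route : String) : Bool :=
  let reg_elements := PySem.Chars.splitOn reg_route.toList ['/']
  let recv_elements := PySem.Chars.splitOn recv_route.toList ['/']
  if reg_elements.length ≠ recv_elements.length then false
  else loopA (reg_elements.zip recv_elements)

-- ===== PORT B =====
-- str.partition('/') on a char list: (head before first '/', some rest-after-'/' if '/' found, else none)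
def partSlash : List Char → List Char × Option (List Char)
  | [] => ([], none)
  | c :: t => if c = '/' then ([], some t)
              else let p := partSlash t; (c :: p.1, p.2)

theorem partSlash_rest_lt : ∀ (cs r : List Char), (partSlash cs).2 = some r → r.length < cs.length := by
  intro cs
  induction cs with
  | nil => intro r h; simp [partSlash] at h
  | cons c t ih =>
      intro r h
      by_cases hc : c = '/'
      · simp [partSlash, hc] at h; subst h; simp
      · simp [partSlash, hc] at h
        have := ih r h
        simp; omega

-- the while-loop of Source B, as tail recursion on the remaining strings
def goB (xs ys : List Char) : Bool :=
  let p := partSlash xs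
  let q := partSlash ys
  if p.1 ≠ ['_'] ∧ p.1 ≠ q.1 then false
  else
    match hp : p.2, q.2 with
    | none, none => true
    | none, some _ => false
    | some _, none => false
    | some a, some b => goB a b
termination_by xs.length
decreasing_by exact partSlash_rest_lt xs a hp

def compare_routes_py_alt (reg_route : String) (recv_route : String) : Bool :=
  goB reg_route.toList recv_route.toList

-- ===== PRECONDITION & SPEC =====
def Spec_compare_routes_py (reg_route : String) (recv_route : String) (out : Bool) : Prop := out = compare_routes_py_alt reg_route recv_route
instance (reg_route : String) (recv_route : String) (out : Bool) : Decidable (Spec_compare_routes_py reg_route recv_route out) := by unfold Spec_compare_routes_py; infer_instance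

-- ===== CLAIM (what is proved, stated in full; the proofs are below) =====
def Claim_equal_compare_routes_py : Prop := ∀ (reg_route : String) (recv_route : String), Dom_compare_routes_py reg_route recv_route → Spec_compare_routes_py reg_route recv_route (compare_routes_py reg_route recv_route)

-- ===== LEMMAS AND PROOFS =====

-- proof-side segmentation on '/', structural
def segsC : List Char → List (List Char)
  | [] => [[]]
  | c :: t => if c = '/' then [] :: segsC t
              else (c :: (segsC t).headI) :: (segsC t).tail

theorem segsC_ne_nil (cs : List Char) : segsC cs ≠ [] := by
  cases cs with
  | nil => simp [segsC]
  | cons c t => by_cases h : c = '/' <;> simp [segsC, h]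

theorem segsC_part_none (cs : List Char) (h : (partSlash cs).2 = none) :
    segsC cs = [(partSlash cs).1] := by
  induction cs with
  | nil => simp [segsC, partSlash]
  | cons c t ih =>
      by_cases hc : c = '/'
      · simp [partSlash, hc] at h
      · simp [partSlash, hc] at h ⊢
        rw [segsC, if_neg hc, ih h]
        simp

theorem segsC_part_some (cs r : List Char) (h : (partSlash cs).2 = some r) :
    segsC cs = (partSlash cs).1 :: segsC r := by
  induction cs with
  | nil => simp [partSlash] at h
  | cons c t ih =>
      by_cases hc : c = '/'
      · simp [partSlash, hc] at h ⊢
        subst h; simp [segsC]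
      · simp [partSlash, hc] at h ⊢
        rw [segsC, if_neg hc, ih h]
        simp

-- goB's unfolding with the dependent match eliminated
theorem goB_unfold (xs ys : List Char) :
    goB xs ys =
      if (partSlash xs).1 ≠ ['_'] ∧ (partSlash xs).1 ≠ (partSlash ys).1 then false
      else
        match (partSlash xs).2, (partSlash ys).2 with
        | none, none => true
        | none, some _ => false
        | some _, none => false
        | some a, some b => goB a b := by
  rw [goB]
  rcases hp : (partSlash xs).2 with _ | a <;> rcases hq : (partSlash ys).2 with _ | b <;>
    simp

def prependAcc (cur : List Char) : List (List Char) → List (List Char)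
  | [] => [cur.reverse]
  | s :: rest => (cur.reverse ++ s) :: rest

theorem go_eq_segsC : ∀ (fuel : Nat) (l cur : List Char) (acc : List (List Char)),
    l.length < fuel →
    PySem.Chars.splitOn.go ['/'] fuel l cur acc = acc.reverse ++ prependAcc cur (segsC l) := by
  intro fuel
  induction fuel with
  | zero => intro l cur acc h; omega
  | succ f ih =>
      intro l cur acc h
      match l with
      | [] =>
          rw [PySem.Chars.splitOn.go.eq_def]
          simp [segsC, prependAcc]
      | x :: t =>
          by_cases hx : x = '/'
          · subst hx
            have hpre : (['/'] : List Char).isPrefixOf ('/' :: t) = true := by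
              simp [List.isPrefixOf]
            rw [PySem.Chars.splitOn.go.eq_def]
            simp only [hpre, if_pos]
            have ht : t.length < f := by simp at h; omega
            rw [show List.drop (['/'] : List Char).length ('/' :: t) = t by simp]
            rw [ih t [] (cur.reverse :: acc) ht]
            rw [show segsC ('/' :: t) = [] :: segsC t by rw [segsC]; simp]
            rcases hs : segsC t with _ | ⟨s, rest⟩
            · exact absurd hs (segsC_ne_nil t)
            · simp [prependAcc]
          · have hpre : (['/'] : List Char).isPrefixOf (x :: t) = false := by
              simp [List.isPrefixOf]; intro hc; exact absurd hc.symm hx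
            rw [PySem.Chars.splitOn.go.eq_def]
            simp only [hpre, Bool.false_eq_true, if_false]
            have ht : t.length < f := by simp at h; omega
            rw [ih t (x :: cur) acc ht]
            rw [show segsC (x :: t) = (x :: (segsC t).headI) :: (segsC t).tail by
              rw [segsC, if_neg hx]]
            rcases hs : segsC t with _ | ⟨s, rest⟩
            · exact absurd hs (segsC_ne_nil t)
            · simp [prependAcc]

theorem splitOn_eq_segsC (cs : List Char) :
    PySem.Chars.splitOn cs ['/'] = segsC cs := by
  show PySem.Chars.splitOn.go ['/'] (cs.length + 1) cs [] [] = segsC cs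
  rw [go_eq_segsC (cs.length + 1) cs [] [] (by omega)]
  rcases hs : segsC cs with _ | ⟨s, rest⟩
  · exact absurd hs (segsC_ne_nil cs)
  · simp [prependAcc]

-- main: B's loop computes A's length-check + zip-loop on the segment lists
theorem goB_eq : ∀ (n : Nat) (xs ys : List Char), xs.length ≤ n →
    goB xs ys = (if (segsC xs).length ≠ (segsC ys).length then false
                 else loopA ((segsC xs).zip (segsC ys))) := by
  intro n
  induction n with
  | zero =>
      intro xs ys hx
      have hxs : xs = [] := by cases xs <;> simp_all
      subst hxs
      rw [goB_unfold]
      rcases hq : (partSlash ys).2 with _ | b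
      · rw [segsC_part_none ys hq]
        simp [partSlash, loopA, segsC]
      · rw [segsC_part_some ys b hq]
        have hne : segsC b ≠ [] := segsC_ne_nil b
        simp [partSlash, segsC, loopA]
        intro h
        exact absurd h hne
  | succ m ih =>
      intro xs ys hx
      rw [goB_unfold]
      rcases hp : (partSlash xs).2 with _ | a <;> rcases hq : (partSlash ys).2 with _ | b
      · rw [segsC_part_none xs hp, segsC_part_none ys hq]
        simp [loopA]
      · rw [segsC_part_none xs hp, segsC_part_some ys b hq]
        have hne : segsC b ≠ [] := segsC_ne_nil b
        simp [loopA]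
        intro h
        exact absurd h hne
      · rw [segsC_part_some xs a hp, segsC_part_none ys hq]
        have hne : segsC a ≠ [] := segsC_ne_nil a
        simp [loopA]
        intro h
        exact absurd h hne
      · rw [segsC_part_some xs a hp, segsC_part_some ys b hq]
        have ha : a.length ≤ m := by
          have := partSlash_rest_lt xs a hp; omega
        rw [show (match (some a : Option (List Char)), (some b : Option (List Char)) with
              | none, none => true
              | none, some _ => false
              | some _, none => false
              | some a, some b => goB a b) = goB a b from rfl]
        rw [ih a b ha]
        by_cases hh : (partSlash xs).1 = ['_'] ∨ (partSlash xs).1 = (partSlash ys).1 <;>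
          by_cases hl : (segsC a).length = (segsC b).length <;>
          simp [hh, hl, loopA]

-- ===== VERDICT (by name: the statement is the Claim_ definition above) =====
theorem compare_routes_py_spec : Claim_equal_compare_routes_py := by
  intro reg recv _
  unfold Spec_compare_routes_py compare_routes_py compare_routes_py_alt
  rw [splitOn_eq_segsC, splitOn_eq_segsC,
      goB_eq reg.toList.length reg.toList recv.toList (le_refl _)]
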